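-- pv_equiv track=rewrite | github.com/lordmauve/weddinglights | colors.py | hsv
-- ===== SOURCE A (Python) =====
-- def hsv(hue):
--     hue %= 360
--     h, i = divmod(hue, 60)
--     p = 0
--     q = 255 * (60 - i) // 60
--     t = 255 * i // 60
--     if h % 2 == 0:
--         vs = [255, t, p]
--     else:
--         vs = [q, 255, p]
--     for _ in range(h // 2):
--         vs.insert(0, vs.pop())
--     return vs
-- ===== SOURCE B (Python) =====
-- def hsv(hue):
--     hue %= 360
--     h, i = divmod(hue, 60)
--     p = 0
--     q = 255 * (60 - i) // 60
--     t = 255 * i // 60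
--     table = [[255, t, p],
--              [q, 255, p],
--              [p, 255, t],
--              [p, q, 255],
--              [t, p, 255],
--              [255, p, q]]
--     return table[h]
-- ===== Notes on version B (the rewrite author's own statement) =====
-- stated objective: simpler
-- what changed: Replaces A's parity branch plus rotate loop (pop last, insert at front, repeated per sector pair) with a flat six-entry sector table indexed directly by the sector number.
import Mathlib
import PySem

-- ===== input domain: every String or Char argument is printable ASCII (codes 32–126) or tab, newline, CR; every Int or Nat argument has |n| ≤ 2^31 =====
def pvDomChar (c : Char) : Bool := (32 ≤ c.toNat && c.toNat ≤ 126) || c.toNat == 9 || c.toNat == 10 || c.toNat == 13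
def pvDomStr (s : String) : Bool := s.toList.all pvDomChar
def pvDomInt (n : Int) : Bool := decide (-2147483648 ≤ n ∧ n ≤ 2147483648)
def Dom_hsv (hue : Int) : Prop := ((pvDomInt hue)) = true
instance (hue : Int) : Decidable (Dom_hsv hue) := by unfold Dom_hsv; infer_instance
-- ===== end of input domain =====

-- B replaces A's build-then-rotate loop with a direct 6-entry sector table lookup (objective: simpler).

-- ===== PORT A =====
def hsv (hue : Int) : List Int :=
  let hue := PySem.Int.mod hue 360
  let h := PySem.Int.floordiv hue 60
  let i := PySem.Int.mod hue 60
  let p : Int := 0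
  let q := PySem.Int.floordiv (255 * (60 - i)) 60
  let t := PySem.Int.floordiv (255 * i) 60
  let vs := if PySem.Int.mod h 2 = 0 then [255, t, p] else [q, 255, p]
  (PySem.List.pyRange 0 (PySem.Int.floordiv h 2) 1).foldl
    (fun vs _ =>
      match PySem.List.pop? vs (-1) with
      | some (x, rest) => PySem.List.insert rest 0 x
      | none => vs) vs

-- ===== PORT B =====
def hsv_alt (hue : Int) : List Int :=
  let hue := PySem.Int.mod hue 360
  let h := PySem.Int.floordiv hue 60
  let i := PySem.Int.mod hue 60
  let p : Int := 0
  let q := PySem.Int.floordiv (255 * (60 - i)) 60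
  let t := PySem.Int.floordiv (255 * i) 60
  let table := [[255, t, p], [q, 255, p], [p, 255, t], [p, q, 255], [t, p, 255], [255, p, q]]
  PySem.List.pyGetD table h []

-- ===== PRECONDITION & SPEC =====
def Spec_hsv (hue : Int) (out : List Int) : Prop := out = hsv_alt hue
instance (hue : Int) (out : List Int) : Decidable (Spec_hsv hue out) := by unfold Spec_hsv; infer_instance

-- ===== CLAIM (what is proved, stated in full; the proofs are below) =====
def Claim_equal_hsv : Prop := ∀ (hue : Int), Dom_hsv hue → Spec_hsv hue (hsv hue)

-- ===== LEMMAS AND PROOFS =====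
theorem hsv_eq_alt (hue : Int) : hsv hue = hsv_alt hue := by
  unfold hsv hsv_alt
  simp only []
  set r := PySem.Int.mod hue 360 with hrdef
  set h := PySem.Int.floordiv r 60 with hhdef
  have h0 : 0 ≤ r := PySem.Int.mod_nonneg hue (by norm_num)
  have h1 : r < 360 := PySem.Int.mod_lt hue (by norm_num)
  have e := PySem.Int.floordiv_mul_add_mod r 60
  have m0 : 0 ≤ PySem.Int.mod r 60 := PySem.Int.mod_nonneg r (by norm_num)
  have m1 : PySem.Int.mod r 60 < 60 := PySem.Int.mod_lt r (by norm_num)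
  rw [← hhdef] at e
  have hh0 : 0 ≤ h := by omega
  have hh6 : h < 6 := by omega
  interval_cases h <;>
    norm_num [PySem.Int.mod, PySem.Int.floordiv, PySem.List.pyRange, PySem.List.pop?,
      PySem.List.pyIdx?, PySem.List.insert, PySem.List.pyGetD, PySem.List.pyGet?,
      PySem.List.sliceIndices, List.range_succ, List.getD,
      (by decide : Int.fmod 0 2 = 0), (by decide : Int.fmod 1 2 = 1),
      (by decide : Int.fmod 2 2 = 0), (by decide : Int.fmod 3 2 = 1),
      (by decide : Int.fmod 4 2 = 0), (by decide : Int.fmod 5 2 = 1),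
      (by decide : Int.fdiv 0 2 = 0), (by decide : Int.fdiv 1 2 = 0),
      (by decide : Int.fdiv 2 2 = 1), (by decide : Int.fdiv 3 2 = 1),
      (by decide : Int.fdiv 4 2 = 2), (by decide : Int.fdiv 5 2 = 2), (by decide : Int.toNat 2 = 2), (by decide : Int.toNat 3 = 3),
      (by decide : Int.toNat 4 = 4), (by decide : Int.toNat 5 = 5),
      List.getElem_cons_succ, List.getElem_cons_zero]

-- ===== VERDICT (by name: the statement is the Claim_ definition above) =====
theorem hsv_spec : Claim_equal_hsv := by
  intro hue _
  unfold Spec_hsv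
  exact hsv_eq_alt hue
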